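-- pv_equiv track=rewrite | github.com/migoamigoea-star/IOI-MIGRATION | scripts/generate_artifacts.py | build_navigation_lookup
-- ===== SOURCE A (Python) =====
-- from typing import Dict, List, Tuple
--
-- def build_navigation_lookup(navigation_groups: List[List[str]]) -> Dict[str, Dict[str, List[str]]]:
--     flat_sequence: List[List[str]] = navigation_groups
--     lookup: Dict[str, Dict[str, List[str]]] = {}
--     for idx, options in enumerate(flat_sequence):
--         previous = flat_sequence[idx - 1] if idx > 0 else []
--         next_items = flat_sequence[idx + 1] if idx + 1 < len(flat_sequence) else []
--         for screen in options:
--             if screen not in lookup: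
--                 lookup[screen] = {"previous": [], "next": []}
--             lookup[screen]["previous"] = sorted(set(lookup[screen]["previous"] + previous))
--             lookup[screen]["next"] = sorted(set(lookup[screen]["next"] + next_items))
--     return lookup
-- ===== SOURCE B (Python) =====
-- from typing import Dict, List
--
-- def build_navigation_lookup(navigation_groups: List[List[str]]) -> Dict[str, Dict[str, List[str]]]:
--     # Pass 1: register every screen (first-seen order) with empty prev/next sets.
--     nav = {}
--     for group in navigation_groups:
--         for screen in group:
--             nav.setdefault(screen, (set(), set()))
--     # Pass 2: walk adjacent group boundaries once.
--     for left, right in zip(navigation_groups, navigation_groups[1:]):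
--         for screen in left:
--             prevs, nexts = nav[screen]
--             nav[screen] = (prevs, nexts | set(right))
--         for screen in right:
--             prevs, nexts = nav[screen]
--             nav[screen] = (prevs | set(left), nexts)
--     return {s: {"previous": sorted(p), "next": sorted(n)} for s, (p, n) in nav.items()}
-- ===== Notes on version B (the rewrite author's own statement) =====
-- stated objective: faster
-- what changed: Instead of per-screen neighbor lookups that re-sort the accumulated previous/next lists on every occurrence, B does one init pass registering screens with empty sets, one pass over adjacent group pairs accumulating neighbor sets, and sorts each set exactly once at the end.
import Mathlib
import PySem

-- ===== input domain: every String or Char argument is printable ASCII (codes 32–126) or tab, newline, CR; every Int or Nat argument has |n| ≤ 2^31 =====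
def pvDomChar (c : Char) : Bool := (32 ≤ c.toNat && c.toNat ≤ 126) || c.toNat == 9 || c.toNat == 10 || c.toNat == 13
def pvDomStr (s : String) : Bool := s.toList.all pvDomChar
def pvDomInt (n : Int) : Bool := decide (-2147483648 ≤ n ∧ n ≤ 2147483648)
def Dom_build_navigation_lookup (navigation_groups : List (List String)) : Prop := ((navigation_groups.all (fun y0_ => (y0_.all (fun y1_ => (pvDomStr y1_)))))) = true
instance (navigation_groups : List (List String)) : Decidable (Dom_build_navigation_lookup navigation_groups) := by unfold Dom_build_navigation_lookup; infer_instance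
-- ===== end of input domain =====

-- B replaces A's per-occurrence neighbour lookups (which re-sort the accumulated lists on
-- every screen occurrence) by an init pass plus one pass over adjacent group pairs that
-- accumulates neighbour sets, sorting each set once at the end.

-- ===== PORT A =====
def build_navigation_lookup (navigation_groups : List (List String)) : List (String × List (String × List String)) :=
  let flat_sequence := navigation_groups
  let lookup : PySem.Dict String (PySem.Dict String (List String)) :=
    (PySem.List.enumerate flat_sequence).foldl (fun lookup io =>
      let idx := io.1
      let options := io.2
      let previous := if idx > 0 then (PySem.List.pyGet? flat_sequence (idx - 1)).getD [] else []
      let next_items := if idx + 1 < PySem.List.len flat_sequence then (PySem.List.pyGet? flat_sequence (idx + 1)).getD [] else []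
      options.foldl (fun lookup screen =>
        let lookup := if lookup.contains screen then lookup
          else lookup.insert screen (PySem.Dict.ofList [("previous", ([] : List String)), ("next", [])])
        -- Python mutates lookup[screen] in place; we read it (present by the guard), update, and store back
        let d := (lookup.get? screen).getD (PySem.Dict.ofList [])
        let d := d.insert "previous" (PySem.List.sorted (PySem.Set.ofList (d.getD "previous" [] ++ previous)) (fun s => s))
        let d := d.insert "next" (PySem.List.sorted (PySem.Set.ofList (d.getD "next" [] ++ next_items)) (fun s => s))
        lookup.insert screen d) lookup)
      PySem.Dict.empty
  lookup.items.map (fun p => (p.1, p.2.items))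

-- ===== PORT B =====
def build_navigation_lookup_alt (navigation_groups : List (List String)) : List (String × List (String × List String)) :=
  -- Pass 1: register every screen (first-seen order) with empty prev/next sets.
  let nav : PySem.Dict String (PySem.Set String × PySem.Set String) :=
    navigation_groups.foldl (fun nav group =>
      group.foldl (fun nav screen => nav.setdefault screen (PySem.Set.empty, PySem.Set.empty)) nav)
      PySem.Dict.empty
  -- Pass 2: walk adjacent group boundaries once.
  let nav :=
    (navigation_groups.zip (PySem.List.slice navigation_groups (some 1) none)).foldl (fun nav lr =>
      let nav := lr.1.foldl (fun nav screen =>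
        -- Python reads nav[screen] (present after pass 1); the getD default is never used
        let v := nav.getD screen (PySem.Set.empty, PySem.Set.empty)
        nav.insert screen (v.1, PySem.Set.union v.2 (PySem.Set.ofList lr.2))) nav
      lr.2.foldl (fun nav screen =>
        let v := nav.getD screen (PySem.Set.empty, PySem.Set.empty)
        nav.insert screen (PySem.Set.union v.1 (PySem.Set.ofList lr.1), v.2)) nav) nav
  nav.items.map (fun p =>
    (p.1, [("previous", PySem.List.sorted p.2.1 (fun s => s)), ("next", PySem.List.sorted p.2.2 (fun s => s))]))

-- ===== PRECONDITION & SPEC =====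
def Spec_build_navigation_lookup (navigation_groups : List (List String)) (out : List (String × List (String × List String))) : Prop := out = build_navigation_lookup_alt navigation_groups
instance (navigation_groups : List (List String)) (out : List (String × List (String × List String))) : Decidable (Spec_build_navigation_lookup navigation_groups out) := by unfold Spec_build_navigation_lookup; infer_instance

-- ===== CLAIM (what is proved, stated in full; the proofs are below) =====
def Claim_equal_build_navigation_lookup : Prop := ∀ (navigation_groups : List (List String)), Dom_build_navigation_lookup navigation_groups → Spec_build_navigation_lookup navigation_groups (build_navigation_lookup navigation_groups)

-- ===== LEMMAS AND PROOFS =====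

-- sorted(set(x)) and the inner dicts A maintains
def pvSD (x : List String) : List String := PySem.List.sorted (PySem.Set.ofList x) (fun s => s)
def pvMkv (q r : List String) : PySem.Dict String (List String) := PySem.Dict.mk [("previous", pvSD q), ("next", pvSD r)]
def pvD0 : PySem.Dict String (List String) := PySem.Dict.ofList [("previous", ([] : List String)), ("next", [])]
def pvE2 : PySem.Set String × PySem.Set String := (PySem.Set.empty, PySem.Set.empty)
-- the value update A performs at one screen occurrence, and A's neighbour selectors
def pvUpdA (p n : List String) (d : PySem.Dict String (List String)) : PySem.Dict String (List String) :=
  let d1 := d.insert "previous" (PySem.List.sorted (PySem.Set.ofList (d.getD "previous" [] ++ p)) (fun s => s))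
  d1.insert "next" (PySem.List.sorted (PySem.Set.ofList (d1.getD "next" [] ++ n)) (fun s => s))
def pvFpA (gs : List (List String)) (i : Int) : List String :=
  if i > 0 then (PySem.List.pyGet? gs (i - 1)).getD [] else []
def pvFnA (gs : List (List String)) (i : Int) : List String :=
  if i + 1 < PySem.List.len gs then (PySem.List.pyGet? gs (i + 1)).getD [] else []
-- the per-key effect of one adjacent pair in B
def pvVstep (k : String) (v : PySem.Set String × PySem.Set String) (lr : List String × List String) :
    PySem.Set String × PySem.Set String :=
  (if k ∈ lr.2 then PySem.Set.union v.1 (PySem.Set.ofList lr.1) else v.1,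
   if k ∈ lr.1 then PySem.Set.union v.2 (PySem.Set.ofList lr.2) else v.2)
-- who is a previous/next neighbour of key k
def pvPhiP (gs : List (List String)) (k x : String) : Prop :=
  ∃ i, ∃ _ : i + 1 < gs.length, k ∈ gs[i+1] ∧ x ∈ gs[i]
def pvPhiN (gs : List (List String)) (k x : String) : Prop :=
  ∃ i, ∃ _ : i + 1 < gs.length, k ∈ gs[i] ∧ x ∈ gs[i+1]

lemma mem_pvSD (x : String) (a : List String) : x ∈ pvSD a ↔ x ∈ a := by
  unfold pvSD
  rw [(PySem.List.sorted_perm (PySem.Set.ofList a) (fun s => s) false).mem_iff]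
  exact PySem.Set.mem_ofList a x

lemma pvSD_congr {a b : List String} (h : ∀ x, x ∈ a ↔ x ∈ b) : pvSD a = pvSD b := by
  unfold pvSD
  apply PySem.List.sorted_eq_of_perm_of_pairwise_lt
  · refine (PySem.List.sorted_perm (PySem.Set.ofList b) (fun s => s) false).trans
      ((List.perm_ext_iff_of_nodup (PySem.Set.nodup_ofList b) (PySem.Set.nodup_ofList a)).2 ?_)
    intro y
    rw [PySem.Set.mem_ofList, PySem.Set.mem_ofList]
    exact (h y).symm
  · exact PySem.List.sorted_ofList_pairwise_lt b

lemma sorted_eq_pvSD {p q : List String} (hnd : p.Nodup) (h : ∀ x, x ∈ p ↔ x ∈ q) :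
    PySem.List.sorted p (fun s => s) = pvSD q := by
  apply PySem.List.sorted_eq_of_perm_of_pairwise_lt
  · refine (PySem.List.sorted_perm (PySem.Set.ofList q) (fun s => s) false).trans
      ((List.perm_ext_iff_of_nodup (PySem.Set.nodup_ofList q) hnd).2 ?_)
    intro y
    rw [PySem.Set.mem_ofList]
    exact (h y).symm
  · exact PySem.List.sorted_ofList_pairwise_lt q

lemma pvSD_absorb' (a b : List String) :
    PySem.List.sorted (PySem.Set.ofList (pvSD a ++ b)) (fun s => s) = pvSD (a ++ b) := by
  show pvSD (pvSD a ++ b) = pvSD (a ++ b)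
  apply pvSD_congr; intro x; simp [mem_pvSD]

lemma pvUpdA_mkv (p n q r : List String) : pvUpdA p n (pvMkv q r) = pvMkv (q ++ p) (r ++ n) := by
  unfold pvUpdA pvMkv
  simp [PySem.Dict.insert, PySem.Dict.getD, PySem.Dict.get?, PySem.Dict.contains, pvSD_absorb']

lemma pvMkv_congr {q q' r r' : List String} (hq : ∀ x, x ∈ q ↔ x ∈ q') (hr : ∀ x, x ∈ r ↔ x ∈ r') :
    pvMkv q r = pvMkv q' r' := by
  unfold pvMkv; rw [pvSD_congr hq, pvSD_congr hr]

lemma pvD0_eq : pvD0 = pvMkv [] [] := by decide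

-- generic characterization of an insert/getD-update loop over screens
lemma foldl_insert_getD_char {ν : Type} (v0 : ν) (F : ν → ν) (P : ν → Prop)
    (hPF : ∀ v, P v → P (F v)) (hFF : ∀ v, P v → F (F v) = F v) :
    ∀ (o : List String) (lk : PySem.Dict String ν), (∀ k, P (lk.getD k v0)) →
      (∀ k, P ((o.foldl (fun d s => d.insert s (F (d.getD s v0))) lk).getD k v0)) ∧
      (∀ k, (o.foldl (fun d s => d.insert s (F (d.getD s v0))) lk).getD k v0
          = if k ∈ o then F (lk.getD k v0) else lk.getD k v0) := by
  intro o
  induction o with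
  | nil => intro lk hP; exact ⟨hP, fun k => by simp⟩
  | cons s rest ih =>
    intro lk hP
    simp only [List.foldl_cons]
    have hP' : ∀ k, P ((lk.insert s (F (lk.getD s v0))).getD k v0) := by
      intro k
      rw [PySem.Dict.getD_insert]
      split_ifs
      · exact hPF _ (hP s)
      · exact hP k
    obtain ⟨h1, h2⟩ := ih (lk.insert s (F (lk.getD s v0))) hP'
    refine ⟨h1, ?_⟩
    intro k
    rw [h2 k, PySem.Dict.getD_insert]
    by_cases hk : k = s
    · subst hk
      by_cases hm : k ∈ rest
      · simp only [if_pos hm, List.mem_cons, true_or, if_pos]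
        exact hFF _ (hP k)
      · simp [hm]
    · simp [hk]


-- A's loop body at one screen is one insert of pvUpdA applied to the current value
lemma stepA_eq (p n : List String) (lookup : PySem.Dict String (PySem.Dict String (List String)))
    (screen : String) :
    (let lookup1 := if lookup.contains screen then lookup
        else lookup.insert screen (PySem.Dict.ofList [("previous", ([] : List String)), ("next", [])]);
     let d := (lookup1.get? screen).getD (PySem.Dict.ofList []);
     let d := d.insert "previous" (PySem.List.sorted (PySem.Set.ofList (d.getD "previous" [] ++ p)) (fun s => s));
     let d := d.insert "next" (PySem.List.sorted (PySem.Set.ofList (d.getD "next" [] ++ n)) (fun s => s));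
     lookup1.insert screen d)
    = lookup.insert screen (pvUpdA p n (lookup.getD screen pvD0)) := by
  by_cases h : lookup.contains screen = true
  · simp only [h, if_true]
    have hs : (lookup.get? screen).isSome := by rw [← PySem.Dict.contains_eq_isSome_get?]; exact h
    obtain ⟨v, hv⟩ := Option.isSome_iff_exists.1 hs
    rw [hv]
    have : lookup.getD screen pvD0 = v := by rw [PySem.Dict.getD_eq_get?_getD, hv]; rfl
    rw [this]
    rfl
  · rw [Bool.not_eq_true] at h
    simp only [h, Bool.false_eq_true, if_false]
    rw [PySem.Dict.get?_insert_self, PySem.Dict.insert_insert_self,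
        PySem.Dict.getD_of_not_contains _ _ h]
    rfl

lemma pvGood_updA (p n : List String) (v : PySem.Dict String (List String))
    (hv : ∃ q r, v = pvMkv q r) : ∃ q r, pvUpdA p n v = pvMkv q r := by
  obtain ⟨q, r, rfl⟩ := hv
  exact ⟨q ++ p, r ++ n, pvUpdA_mkv p n q r⟩

lemma pvUpdA_idem (p n : List String) (v : PySem.Dict String (List String))
    (hv : ∃ q r, v = pvMkv q r) : pvUpdA p n (pvUpdA p n v) = pvUpdA p n v := by
  obtain ⟨q, r, rfl⟩ := hv
  rw [pvUpdA_mkv, pvUpdA_mkv]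
  apply pvMkv_congr <;> intro x <;> constructor <;> intro hx <;> simp only [List.mem_append] at hx ⊢ <;> tauto

-- per-key value of A's whole outer loop, as a fold over the enumerated groups
lemma outerA_char (gs : List (List String)) (k : String) :
    ∀ (es : List (Int × List String)) (lk : PySem.Dict String (PySem.Dict String (List String))),
      (∀ k', ∃ q r, lk.getD k' pvD0 = pvMkv q r) →
      (es.foldl (fun lk io => io.2.foldl
          (fun d s => d.insert s (pvUpdA (pvFpA gs io.1) (pvFnA gs io.1) (d.getD s pvD0))) lk) lk).getD k pvD0
        = es.foldl (fun v io => if k ∈ io.2 then pvUpdA (pvFpA gs io.1) (pvFnA gs io.1) v else v) (lk.getD k pvD0) := by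
  intro es
  induction es with
  | nil => intro lk _; rfl
  | cons io rest ih =>
    intro lk hG
    simp only [List.foldl_cons]
    obtain ⟨hG', hval⟩ := foldl_insert_getD_char pvD0 (pvUpdA (pvFpA gs io.1) (pvFnA gs io.1))
      (fun v => ∃ q r, v = pvMkv q r) (pvGood_updA _ _) (pvUpdA_idem _ _) io.2 lk hG
    rw [ih _ hG', hval k]

-- folding pvUpdA over triples from a pvMkv value accumulates the contribution lists
lemma valfoldA (gs : List (List String)) (k : String) :
    ∀ (es : List (Int × List String)) (q r : List String),
      es.foldl (fun v io => if k ∈ io.2 then pvUpdA (pvFpA gs io.1) (pvFnA gs io.1) v else v) (pvMkv q r)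
        = pvMkv (q ++ es.flatMap (fun io => if k ∈ io.2 then pvFpA gs io.1 else []))
                (r ++ es.flatMap (fun io => if k ∈ io.2 then pvFnA gs io.1 else [])) := by
  intro es
  induction es with
  | nil => intro q r; simp
  | cons io rest ih =>
    intro q r
    simp only [List.foldl_cons, List.flatMap_cons]
    by_cases hk : k ∈ io.2
    · rw [if_pos hk, pvUpdA_mkv, ih, if_pos hk, if_pos hk, List.append_assoc, List.append_assoc]
    · rw [if_neg hk, ih, if_neg hk, if_neg hk]
      simp

-- keys of A's dict: every screen, first-seen order
lemma keysA_char (gs : List (List String)) :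
    ∀ (es : List (Int × List String)) (lk : PySem.Dict String (PySem.Dict String (List String))),
      (es.foldl (fun lk io => io.2.foldl
          (fun d s => d.insert s (pvUpdA (pvFpA gs io.1) (pvFnA gs io.1) (d.getD s pvD0))) lk) lk).keys
        = es.foldl (fun ks io => PySem.Set.update ks io.2) lk.keys := by
  intro es
  induction es with
  | nil => intro lk; rfl
  | cons io rest ih =>
    intro lk
    simp only [List.foldl_cons]
    rw [ih, PySem.Dict.keys_foldl_insert]

lemma foldl_update_flatten {α : Type} [BEq α] :
    ∀ (gs : List (List α)) (s : PySem.Set α),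
      gs.foldl PySem.Set.update s = PySem.Set.update s gs.flatten := by
  intro gs
  induction gs with
  | nil => intro s; rfl
  | cons g rest ih =>
    intro s
    simp only [List.foldl_cons, List.flatten_cons]
    rw [ih, PySem.Set.update_append]


-- membership in A's accumulated previous-contributions
lemma memCP (gs : List (List String)) (k x : String) :
    (x ∈ (PySem.List.enumerate gs).flatMap (fun io => if k ∈ io.2 then pvFpA gs io.1 else []))
      ↔ pvPhiP gs k x := by
  rw [List.mem_flatMap]
  constructor
  · rintro ⟨io, hio, hx⟩
    rw [PySem.List.mem_enumerate_iff] at hio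
    obtain ⟨j, hj, rfl⟩ := hio
    simp only [zero_add] at hx
    by_cases hk : k ∈ gs[j]
    · rw [if_pos hk] at hx
      unfold pvFpA at hx
      match j with
      | 0 => simp at hx
      | m + 1 =>
        have h1 : ((m + 1 : Nat) : Int) > 0 := by positivity
        rw [if_pos h1] at hx
        have h2 : ((m + 1 : Nat) : Int) - 1 = (m : Int) := by push_cast; ring
        rw [h2, PySem.List.pyGet?_natCast, List.getElem?_eq_getElem (by omega)] at hx
        exact ⟨m, hj, hk, hx⟩
    · rw [if_neg hk] at hx
      simp at hx
  · rintro ⟨i, h, hk, hx⟩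
    refine ⟨(((i + 1 : Nat) : Int), gs[i+1]), ?_, ?_⟩
    · rw [PySem.List.mem_enumerate_iff]
      exact ⟨i + 1, h, by simp⟩
    · rw [if_pos hk]
      unfold pvFpA
      have h1 : ((i + 1 : Nat) : Int) > 0 := by positivity
      have h2 : ((i + 1 : Nat) : Int) - 1 = (i : Int) := by push_cast; ring
      rw [if_pos h1, h2, PySem.List.pyGet?_natCast, List.getElem?_eq_getElem (by omega)]
      exact hx

-- membership in A's accumulated next-contributions
lemma memCN (gs : List (List String)) (k x : String) :
    (x ∈ (PySem.List.enumerate gs).flatMap (fun io => if k ∈ io.2 then pvFnA gs io.1 else []))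
      ↔ pvPhiN gs k x := by
  rw [List.mem_flatMap]
  constructor
  · rintro ⟨io, hio, hx⟩
    rw [PySem.List.mem_enumerate_iff] at hio
    obtain ⟨j, hj, rfl⟩ := hio
    simp only [zero_add] at hx
    by_cases hk : k ∈ gs[j]
    · rw [if_pos hk] at hx
      unfold pvFnA at hx
      by_cases hb : (j : Int) + 1 < PySem.List.len gs
      · have hb' : j + 1 < gs.length := by
          rw [PySem.List.len_eq] at hb; exact_mod_cast hb
        have h2 : (j : Int) + 1 = ((j + 1 : Nat) : Int) := by push_cast; ring
        rw [if_pos hb, h2, PySem.List.pyGet?_natCast, List.getElem?_eq_getElem hb'] at hx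
        exact ⟨j, hb', hk, hx⟩
      · rw [if_neg hb] at hx
        simp at hx
    · rw [if_neg hk] at hx
      simp at hx
  · rintro ⟨i, h, hk, hx⟩
    refine ⟨(((i : Nat) : Int), gs[i]), ?_, ?_⟩
    · rw [PySem.List.mem_enumerate_iff]
      exact ⟨i, by omega, by simp⟩
    · rw [if_pos hk]
      unfold pvFnA
      have hb : (i : Int) + 1 < PySem.List.len gs := by
        rw [PySem.List.len_eq]; exact_mod_cast h
      have h2 : (i : Int) + 1 = ((i + 1 : Nat) : Int) := by push_cast; ring
      rw [if_pos hb, h2, PySem.List.pyGet?_natCast, List.getElem?_eq_getElem h]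
      exact hx


-- Set helpers for B's loops
lemma update_of_subset {s : PySem.Set String} {l : List String} (h : ∀ y ∈ l, y ∈ s) :
    PySem.Set.update s l = s := by
  rw [PySem.Set.update_eq_append_filter]
  have hnil : (PySem.Set.ofList l).filter (fun y => !PySem.Set.contains s y) = [] := by
    apply List.filter_eq_nil_iff.2
    intro y hy
    have hm : y ∈ s := h y ((PySem.Set.mem_ofList l y).1 hy)
    simp [PySem.Set.contains, hm]
  rw [hnil, List.append_nil]

lemma union_absorb (s : PySem.Set String) (t : List String) :
    PySem.Set.union (PySem.Set.union s t) t = PySem.Set.union s t := by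
  show PySem.Set.update (PySem.Set.update s t) t = PySem.Set.update s t
  apply update_of_subset
  intro y hy
  exact (PySem.Set.mem_update s t y).2 (Or.inr hy)

-- B's first pass: keys in first-seen order, all values the empty pair
lemma keys_setdefault_add {ν : Type} (d : PySem.Dict String ν) (k : String) (v : ν) :
    (d.setdefault k v).keys = PySem.Set.add d.keys k := by
  rw [PySem.Dict.keys_setdefault]
  unfold PySem.Set.add
  by_cases h : d.contains k = true
  · have : PySem.Set.contains d.keys k = true := by
      simp [PySem.Set.contains, (PySem.Dict.contains_iff_mem_keys d k).1 h]
    rw [if_pos h, if_pos this]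
  · have hmem : k ∉ d.keys := fun hm => h ((PySem.Dict.contains_iff_mem_keys d k).2 hm)
    rw [if_neg h, if_neg (by simpa [PySem.Set.contains] using hmem)]

lemma initB_keys_fold {ν : Type} (v0 : ν) :
    ∀ (l : List String) (d : PySem.Dict String ν),
      (l.foldl (fun d s => d.setdefault s v0) d).keys = PySem.Set.update d.keys l := by
  intro l
  induction l with
  | nil => intro d; rfl
  | cons s rest ih =>
    intro d
    rw [List.foldl_cons, ih, PySem.Set.update_cons, keys_setdefault_add]

lemma initB_keys {ν : Type} (v0 : ν) :
    ∀ (gs : List (List String)) (d : PySem.Dict String ν),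
      (gs.foldl (fun nav group => group.foldl (fun nav screen => nav.setdefault screen v0) nav) d).keys
        = PySem.Set.update d.keys gs.flatten := by
  intro gs
  induction gs with
  | nil => intro d; simp [PySem.Set.update]
  | cons g rest ih =>
    intro d
    rw [List.foldl_cons, ih, initB_keys_fold, List.flatten_cons, PySem.Set.update_append]

lemma setdefault_getD_const {ν : Type} (v0 : ν ) :
    ∀ (l : List String) (d : PySem.Dict String ν), (∀ k, d.getD k v0 = v0) →
      ∀ k, (l.foldl (fun d s => d.setdefault s v0) d).getD k v0 = v0 := by
  intro l
  induction l with
  | nil => intro d h k; exact h k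
  | cons s rest ih =>
    intro d h k
    rw [List.foldl_cons]
    refine ih _ ?_ k
    intro k'
    rw [PySem.Dict.getD_eq_get?_getD]
    by_cases hk : k' = s
    · subst hk
      rw [PySem.Dict.get?_setdefault_self]
      show (d.get? k').getD v0 = v0
      rw [← PySem.Dict.getD_eq_get?_getD]
      exact h k'
    · rw [PySem.Dict.get?_setdefault_of_ne d v0 hk, ← PySem.Dict.getD_eq_get?_getD]
      exact h k'

lemma initB_getD {ν : Type} (v0 : ν) :
    ∀ (gs : List (List String)) (d : PySem.Dict String ν), (∀ k, d.getD k v0 = v0) →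
      ∀ k, (gs.foldl (fun nav group => group.foldl (fun nav screen => nav.setdefault screen v0) nav) d).getD k v0 = v0 := by
  intro gs
  induction gs with
  | nil => intro d h k; exact h k
  | cons g rest ih =>
    intro d h k
    rw [List.foldl_cons]
    exact ih _ (setdefault_getD_const v0 g d h) k

-- B's second pass, per-key value as a fold of pvVstep over the pair list
lemma pairstepB_getD (l r : List String) (nav : PySem.Dict String (PySem.Set String × PySem.Set String)) :
    ∀ k, (r.foldl (fun nav screen =>
            nav.insert screen (PySem.Set.union (nav.getD screen pvE2).1 (PySem.Set.ofList l), (nav.getD screen pvE2).2))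
          (l.foldl (fun nav screen =>
            nav.insert screen ((nav.getD screen pvE2).1, PySem.Set.union (nav.getD screen pvE2).2 (PySem.Set.ofList r))) nav)).getD k pvE2
      = pvVstep k (nav.getD k pvE2) (l, r) := by
  intro k
  obtain ⟨-, h1⟩ := foldl_insert_getD_char pvE2
    (fun v => (v.1, PySem.Set.union v.2 (PySem.Set.ofList r))) (fun _ => True)
    (fun _ _ => trivial) (fun v _ => by simp [union_absorb]) l nav (fun _ => trivial)
  obtain ⟨-, h2⟩ := foldl_insert_getD_char pvE2
    (fun v => (PySem.Set.union v.1 (PySem.Set.ofList l), v.2)) (fun _ => True)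
    (fun _ _ => trivial) (fun v _ => by simp [union_absorb]) r
    (l.foldl (fun nav screen =>
      nav.insert screen ((nav.getD screen pvE2).1, PySem.Set.union (nav.getD screen pvE2).2 (PySem.Set.ofList r))) nav)
    (fun _ => trivial)
  rw [h2 k, h1 k]
  unfold pvVstep
  by_cases hl : k ∈ l <;> by_cases hr : k ∈ r <;> simp [hl, hr]

lemma pairB_getD :
    ∀ (ps : List (List String × List String)) (nav : PySem.Dict String (PySem.Set String × PySem.Set String)) (k : String),
      (ps.foldl (fun nav lr =>
          lr.2.foldl (fun nav screen =>
            nav.insert screen (PySem.Set.union (nav.getD screen pvE2).1 (PySem.Set.ofList lr.1), (nav.getD screen pvE2).2))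
          (lr.1.foldl (fun nav screen =>
            nav.insert screen ((nav.getD screen pvE2).1, PySem.Set.union (nav.getD screen pvE2).2 (PySem.Set.ofList lr.2))) nav)) nav).getD k pvE2
        = ps.foldl (pvVstep k) (nav.getD k pvE2) := by
  intro ps
  induction ps with
  | nil => intro nav k; rfl
  | cons lr rest ih =>
    intro nav k
    rw [List.foldl_cons, List.foldl_cons, ih, pairstepB_getD lr.1 lr.2 nav k]

-- membership and nodup through the pvVstep fold
lemma memVfold_fst (k x : String) :
    ∀ (ps : List (List String × List String)) (v : PySem.Set String × PySem.Set String),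
      (x ∈ (ps.foldl (pvVstep k) v).1) ↔ x ∈ v.1 ∨ ∃ lr ∈ ps, k ∈ lr.2 ∧ x ∈ lr.1 := by
  intro ps
  induction ps with
  | nil => intro v; simp
  | cons lr rest ih =>
    intro v
    rw [List.foldl_cons, ih]
    unfold pvVstep
    by_cases hr : k ∈ lr.2 <;>
      simp only [hr, if_true, if_false, PySem.Set.mem_union, PySem.Set.mem_ofList, List.mem_cons] <;>
      aesop

lemma memVfold_snd (k x : String) :
    ∀ (ps : List (List String × List String)) (v : PySem.Set String × PySem.Set String),
      (x ∈ (ps.foldl (pvVstep k) v).2) ↔ x ∈ v.2 ∨ ∃ lr ∈ ps, k ∈ lr.1 ∧ x ∈ lr.2 := by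
  intro ps
  induction ps with
  | nil => intro v; simp
  | cons lr rest ih =>
    intro v
    rw [List.foldl_cons, ih]
    unfold pvVstep
    by_cases hl : k ∈ lr.1 <;>
      simp only [hl, if_true, if_false, PySem.Set.mem_union, PySem.Set.mem_ofList, List.mem_cons] <;>
      aesop

lemma nodupVfold (k : String) :
    ∀ (ps : List (List String × List String)) (v : PySem.Set String × PySem.Set String),
      v.1.Nodup → v.2.Nodup →
      ((ps.foldl (pvVstep k) v).1.Nodup ∧ (ps.foldl (pvVstep k) v).2.Nodup) := by
  intro ps
  induction ps with
  | nil => intro v h1 h2; exact ⟨h1, h2⟩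
  | cons lr rest ih =>
    intro v h1 h2
    rw [List.foldl_cons]
    refine ih _ ?_ ?_
    · unfold pvVstep
      split_ifs <;> first | exact PySem.Set.nodup_union _ _ h1 | exact h1
    · unfold pvVstep
      split_ifs <;> first | exact PySem.Set.nodup_union _ _ h2 | exact h2


-- canonical forms of the two programs' folds
def pvFoldA (gs : List (List String)) : PySem.Dict String (PySem.Dict String (List String)) :=
  (PySem.List.enumerate gs).foldl (fun lk io =>
    io.2.foldl (fun d s => d.insert s (pvUpdA (pvFpA gs io.1) (pvFnA gs io.1) (d.getD s pvD0))) lk)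
    PySem.Dict.empty
def pvInitB (gs : List (List String)) : PySem.Dict String (PySem.Set String × PySem.Set String) :=
  gs.foldl (fun nav group => group.foldl (fun nav screen => nav.setdefault screen pvE2) nav) PySem.Dict.empty
def pvPairsB (gs : List (List String)) : List (List String × List String) := gs.zip (gs.drop 1)
def pvFoldB (gs : List (List String)) : PySem.Dict String (PySem.Set String × PySem.Set String) :=
  (pvPairsB gs).foldl (fun nav lr =>
    lr.2.foldl (fun nav screen =>
      nav.insert screen (PySem.Set.union (nav.getD screen pvE2).1 (PySem.Set.ofList lr.1), (nav.getD screen pvE2).2))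
    (lr.1.foldl (fun nav screen =>
      nav.insert screen ((nav.getD screen pvE2).1, PySem.Set.union (nav.getD screen pvE2).2 (PySem.Set.ofList lr.2))) nav)) (pvInitB gs)

-- B's pair pass does not change the key list (every screen is already registered)
lemma pairB_keys :
    ∀ (ps : List (List String × List String)) (nav : PySem.Dict String (PySem.Set String × PySem.Set String)),
      (∀ lr ∈ ps, (∀ s ∈ lr.1, s ∈ nav.keys) ∧ (∀ s ∈ lr.2, s ∈ nav.keys)) →
      (ps.foldl (fun nav lr =>
          lr.2.foldl (fun nav screen =>
            nav.insert screen (PySem.Set.union (nav.getD screen pvE2).1 (PySem.Set.ofList lr.1), (nav.getD screen pvE2).2))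
          (lr.1.foldl (fun nav screen =>
            nav.insert screen ((nav.getD screen pvE2).1, PySem.Set.union (nav.getD screen pvE2).2 (PySem.Set.ofList lr.2))) nav)) nav).keys
        = nav.keys := by
  intro ps
  induction ps with
  | nil => intro nav _; rfl
  | cons lr rest ih =>
    intro nav h
    rw [List.foldl_cons]
    have hk1 : (lr.1.foldl (fun nav screen =>
        nav.insert screen ((nav.getD screen pvE2).1, PySem.Set.union (nav.getD screen pvE2).2 (PySem.Set.ofList lr.2))) nav).keys = nav.keys := by
      rw [PySem.Dict.keys_foldl_insert]
      exact update_of_subset (h lr (List.mem_cons_self)).1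
    have hk2 : (lr.2.foldl (fun nav screen =>
        nav.insert screen (PySem.Set.union (nav.getD screen pvE2).1 (PySem.Set.ofList lr.1), (nav.getD screen pvE2).2))
        (lr.1.foldl (fun nav screen =>
          nav.insert screen ((nav.getD screen pvE2).1, PySem.Set.union (nav.getD screen pvE2).2 (PySem.Set.ofList lr.2))) nav)).keys = nav.keys := by
      rw [PySem.Dict.keys_foldl_insert, hk1]
      exact update_of_subset (h lr (List.mem_cons_self)).2
    rw [ih _ ?_, hk2]
    intro lr' h'
    constructor
    · intro s hs; rw [hk2]; exact ((h lr' (List.mem_cons_of_mem _ h')).1 s hs)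
    · intro s hs; rw [hk2]; exact ((h lr' (List.mem_cons_of_mem _ h')).2 s hs)

-- membership over the adjacent-pair list is exactly the neighbour relation
lemma memPairsP (gs : List (List String)) (k x : String) :
    (∃ lr ∈ pvPairsB gs, k ∈ lr.2 ∧ x ∈ lr.1) ↔ pvPhiP gs k x := by
  unfold pvPairsB
  constructor
  · rintro ⟨lr, hm, hk, hx⟩
    obtain ⟨i, hi, hg⟩ := List.getElem_of_mem hm
    have hlen : i + 1 < gs.length := by
      have h2 := hi
      rw [List.length_zip, List.length_drop] at h2
      omega
    rw [List.getElem_zip] at hg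
    refine ⟨i, hlen, ?_, ?_⟩
    · have hdl : i < (gs.drop 1).length := by rw [List.length_drop]; omega
      have this : (gs.drop 1)[i] = gs[1 + i] := List.getElem_drop
      rw [← hg] at hk
      simp only [this] at hk
      have h1 : 1 + i = i + 1 := by omega
      rw [← hg] at hx
      simpa [h1] using hk
    · rw [← hg] at hx
      exact hx
  · rintro ⟨i, hlen, hk, hx⟩
    have hzl : i < (gs.zip (gs.drop 1)).length := by
      rw [List.length_zip, List.length_drop]; omega
    refine ⟨(gs.zip (gs.drop 1))[i], List.getElem_mem hzl, ?_, ?_⟩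
    · rw [List.getElem_zip]
      have hdl : i < (gs.drop 1).length := by rw [List.length_drop]; omega
      have this : (gs.drop 1)[i] = gs[1 + i] := List.getElem_drop
      simp only [this]
      have h1 : 1 + i = i + 1 := by omega
      simpa [h1] using hk
    · rw [List.getElem_zip]
      exact hx

lemma memPairsN (gs : List (List String)) (k x : String) :
    (∃ lr ∈ pvPairsB gs, k ∈ lr.1 ∧ x ∈ lr.2) ↔ pvPhiN gs k x := by
  unfold pvPairsB
  constructor
  · rintro ⟨lr, hm, hk, hx⟩
    obtain ⟨i, hi, hg⟩ := List.getElem_of_mem hm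
    have hlen : i + 1 < gs.length := by
      have h2 := hi
      rw [List.length_zip, List.length_drop] at h2
      omega
    rw [List.getElem_zip] at hg
    refine ⟨i, hlen, ?_, ?_⟩
    · rw [← hg] at hk
      exact hk
    · have hdl : i < (gs.drop 1).length := by rw [List.length_drop]; omega
      have this : (gs.drop 1)[i] = gs[1 + i] := List.getElem_drop
      rw [← hg] at hx
      simp only [this] at hx
      have h1 : 1 + i = i + 1 := by omega
      simpa [h1] using hx
  · rintro ⟨i, hlen, hk, hx⟩
    have hzl : i < (gs.zip (gs.drop 1)).length := by
      rw [List.length_zip, List.length_drop]; omega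
    refine ⟨(gs.zip (gs.drop 1))[i], List.getElem_mem hzl, ?_, ?_⟩
    · rw [List.getElem_zip]
      exact hk
    · rw [List.getElem_zip]
      have hdl : i < (gs.drop 1).length := by rw [List.length_drop]; omega
      have this : (gs.drop 1)[i] = gs[1 + i] := List.getElem_drop
      simp only [this]
      have h1 : 1 + i = i + 1 := by omega
      simpa [h1] using hx

-- ===== VERDICT (by name: the statement is the Claim_ definition above) =====
theorem build_navigation_lookup_spec : Claim_equal_build_navigation_lookup := by
  intro gs _
  unfold Spec_build_navigation_lookup
  -- A in canonical form
  have hA : build_navigation_lookup gs = (pvFoldA gs).items.map (fun p => (p.1, p.2.items)) := by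
    simp only [build_navigation_lookup, pvFoldA]
    congr 1
    congr 1
    apply PySem.List.foldl_congr_mem
    intro acc io _
    apply PySem.List.foldl_congr_mem
    intro acc2 s _
    exact stepA_eq _ _ acc2 s
  -- B in canonical form
  have hB : build_navigation_lookup_alt gs = (pvFoldB gs).items.map (fun p =>
      (p.1, [("previous", PySem.List.sorted p.2.1 (fun s => s)), ("next", PySem.List.sorted p.2.2 (fun s => s))])) := by
    simp only [build_navigation_lookup_alt, pvFoldB, pvPairsB, pvInitB]
    rw [PySem.List.slice_from gs (by norm_num : (0:Int) ≤ 1)]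
    rfl
  -- keys of both dicts: all screens, first-seen order
  have hkA : (pvFoldA gs).keys = PySem.Set.ofList gs.flatten := by
    unfold pvFoldA
    rw [keysA_char gs (PySem.List.enumerate gs) PySem.Dict.empty]
    have h2 : (PySem.List.enumerate gs).foldl (fun ks io => PySem.Set.update ks io.2) (PySem.Dict.empty : PySem.Dict String (PySem.Dict String (List String))).keys
        = gs.foldl PySem.Set.update [] := by
      conv_rhs => rw [← PySem.List.map_snd_enumerate gs 0]
      rw [List.foldl_map]
      rfl
    rw [h2, foldl_update_flatten]
    exact PySem.Set.update_empty _
  have hkInit : (pvInitB gs).keys = PySem.Set.ofList gs.flatten := by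
    unfold pvInitB
    rw [initB_keys pvE2 gs PySem.Dict.empty]
    exact PySem.Set.update_empty _
  have hpairs_sub : ∀ lr ∈ pvPairsB gs, (∀ s ∈ lr.1, s ∈ gs.flatten) ∧ (∀ s ∈ lr.2, s ∈ gs.flatten) := by
    intro lr hlr
    obtain ⟨i, hi, hg⟩ := List.getElem_of_mem hlr
    have hlen : i + 1 < gs.length := by
      have h2 := hi
      unfold pvPairsB at h2
      rw [List.length_zip, List.length_drop] at h2
      omega
    have hdl : i < (gs.drop 1).length := by rw [List.length_drop]; omega
    unfold pvPairsB at hg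
    rw [List.getElem_zip] at hg
    constructor
    · intro s hs
      rw [List.mem_flatten]
      refine ⟨gs[i], List.getElem_mem _, ?_⟩
      rw [← hg] at hs
      exact hs
    · intro s hs
      rw [List.mem_flatten]
      refine ⟨(gs.drop 1)[i], List.mem_of_mem_drop (List.getElem_mem _), ?_⟩
      rw [← hg] at hs
      exact hs
  have hkB : (pvFoldB gs).keys = PySem.Set.ofList gs.flatten := by
    unfold pvFoldB
    rw [pairB_keys (pvPairsB gs) (pvInitB gs) ?_, hkInit]
    intro lr hlr
    obtain ⟨h1, h2⟩ := hpairs_sub lr hlr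
    constructor
    · intro s hs
      rw [hkInit]
      exact (PySem.Set.mem_ofList _ _).2 (h1 s hs)
    · intro s hs
      rw [hkInit]
      exact (PySem.Set.mem_ofList _ _).2 (h2 s hs)
  -- per-key values of both dicts
  have hvA : ∀ k, (pvFoldA gs).getD k pvD0
      = pvMkv ((PySem.List.enumerate gs).flatMap (fun io => if k ∈ io.2 then pvFpA gs io.1 else []))
              ((PySem.List.enumerate gs).flatMap (fun io => if k ∈ io.2 then pvFnA gs io.1 else [])) := by
    intro k
    unfold pvFoldA
    rw [outerA_char gs k (PySem.List.enumerate gs) PySem.Dict.empty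
        (fun k' => ⟨[], [], by rw [PySem.Dict.getD_empty]; exact pvD0_eq⟩)]
    rw [PySem.Dict.getD_empty, pvD0_eq, valfoldA]
    simp
  have hvB : ∀ k, (pvFoldB gs).getD k pvE2 = (pvPairsB gs).foldl (pvVstep k) pvE2 := by
    intro k
    unfold pvFoldB
    rw [pairB_getD (pvPairsB gs) (pvInitB gs) k]
    congr 1
    unfold pvInitB
    exact initB_getD pvE2 gs PySem.Dict.empty (fun k' => PySem.Dict.getD_empty k' pvE2) k
  -- assemble
  rw [hA, hB,
      PySem.Dict.items_eq_map_keys (pvFoldA gs) (by rw [hkA]; exact PySem.Set.nodup_ofList _) pvD0,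
      PySem.Dict.items_eq_map_keys (pvFoldB gs) (by rw [hkB]; exact PySem.Set.nodup_ofList _) pvE2,
      List.map_map, List.map_map, hkA, hkB]
  apply List.map_congr_left
  intro k _
  simp only [Function.comp]
  rw [hvA k, hvB k]
  have hP : PySem.List.sorted ((pvPairsB gs).foldl (pvVstep k) pvE2).1 (fun s => s)
      = pvSD ((PySem.List.enumerate gs).flatMap (fun io => if k ∈ io.2 then pvFpA gs io.1 else [])) := by
    apply sorted_eq_pvSD
    · exact (nodupVfold k (pvPairsB gs) pvE2 List.nodup_nil List.nodup_nil).1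
    · intro x
      rw [memVfold_fst k x (pvPairsB gs) pvE2]
      have : (x ∈ pvE2.1) = False := by simp [pvE2, PySem.Set.empty]
      rw [this, false_or, memPairsP]
      exact (memCP gs k x).symm
  have hN : PySem.List.sorted ((pvPairsB gs).foldl (pvVstep k) pvE2).2 (fun s => s)
      = pvSD ((PySem.List.enumerate gs).flatMap (fun io => if k ∈ io.2 then pvFnA gs io.1 else [])) := by
    apply sorted_eq_pvSD
    · exact (nodupVfold k (pvPairsB gs) pvE2 List.nodup_nil List.nodup_nil).2
    · intro x
      rw [memVfold_snd k x (pvPairsB gs) pvE2]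
      have : (x ∈ pvE2.2) = False := by simp [pvE2, PySem.Set.empty]
      rw [this, false_or, memPairsN]
      exact (memCN gs k x).symm
  rw [hP, hN]
  rfl
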